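-- pv_equiv track=rewrite | github.com/queelius/computational-explorations | src/sidon_squares.py | _greedy_sidon_squares
-- ===== SOURCE A (Python) =====
-- from typing import List, Optional, Set, Tuple
--
-- def _greedy_sidon_squares(sq: List[int]) -> Set[int]:
--     """Greedy construction of a Sidon subset from a list of squares."""
--     selected = []
--     sums = set()
--     for x in sq:
--         new_sums = set()
--         conflict = False
--         for s in selected:
--             pair_sum = s + x
--             if pair_sum in sums or pair_sum in new_sums:
--                 conflict = True
--                 break
--             new_sums.add(pair_sum)
--         if conflict:
--             continue
--         self_sum = 2 * x
--         if self_sum in sums or self_sum in new_sums: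
--             continue
--         new_sums.add(self_sum)
--         selected.append(x)
--         sums |= new_sums
--     return set(selected)
-- ===== SOURCE B (Python) =====
-- from typing import List, Set
--
--
-- def _greedy_sidon_squares(sq: List[int]) -> Set[int]:
--     """Greedy Sidon subset: keep x iff all pairwise sums of selected+[x] stay distinct."""
--     selected = []
--     for x in sq:
--         cand = selected + [x]
--         sums = [a + b for j, b in enumerate(cand) for a in cand[:j + 1]]
--         if len(sums) == len(set(sums)):
--             selected = cand
--     return set(selected)
-- ===== Notes on version B (the rewrite author's own statement) =====
-- stated objective: simpler
-- what changed: B keeps no incremental sums set and no inner conflict loop with break: for each candidate it rebuilds the full list of pairwise sums of selected+[x] by comprehension and accepts iff that list has no duplicate (len == len(set)).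
import Mathlib
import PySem

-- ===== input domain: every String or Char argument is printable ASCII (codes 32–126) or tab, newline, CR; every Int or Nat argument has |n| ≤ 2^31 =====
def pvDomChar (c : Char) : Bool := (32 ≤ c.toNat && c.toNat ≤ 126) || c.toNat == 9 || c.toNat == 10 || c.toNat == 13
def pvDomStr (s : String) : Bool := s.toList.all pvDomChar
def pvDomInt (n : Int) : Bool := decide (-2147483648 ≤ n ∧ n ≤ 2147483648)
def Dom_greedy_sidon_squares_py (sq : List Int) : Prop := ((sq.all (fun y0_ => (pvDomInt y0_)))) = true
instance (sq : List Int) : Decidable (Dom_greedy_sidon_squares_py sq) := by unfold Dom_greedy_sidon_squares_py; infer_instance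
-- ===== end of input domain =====

-- B rebuilds the full pairwise-sum list of selected+[x] per candidate and tests it for duplicates,
-- replacing A's incremental sums set and break-driven inner conflict loop (objective: simpler).


-- ===== PORT A =====
-- inner 'for s in selected' loop with break: returns (new_sums, conflict)
def sidonInner (x : Int) (sums : PySem.Set Int) : List Int → PySem.Set Int → PySem.Set Int × Bool
  | [], new_sums => (new_sums, false)
  | s :: rest, new_sums =>
    let pair_sum := s + x
    if PySem.Set.contains sums pair_sum || PySem.Set.contains new_sums pair_sum then
      (new_sums, true)
    else
      sidonInner x sums rest (PySem.Set.add new_sums pair_sum)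

-- one iteration of the 'for x in sq' loop over the state (selected, sums)
def sidonStep (st : List Int × PySem.Set Int) (x : Int) : List Int × PySem.Set Int :=
  let res := sidonInner x st.2 st.1 PySem.Set.empty
  if res.2 then st
  else
    let self_sum := 2 * x
    if PySem.Set.contains st.2 self_sum || PySem.Set.contains res.1 self_sum then st
    else
      (st.1 ++ [x], PySem.Set.update st.2 (PySem.Set.add res.1 self_sum))

def greedy_sidon_squares_py (sq : List Int) : List Int :=
  PySem.Set.ofList (sq.foldl sidonStep ([], PySem.Set.empty)).1

-- ===== PORT B =====
-- [a + b for j, b in enumerate(cand) for a in cand[:j + 1]]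
def pairSums (cand : List Int) : List Int :=
  (PySem.List.enumerate cand).flatMap
    (fun jb => (PySem.List.slice cand none (some (jb.1 + 1))).map (fun a => a + jb.2))

def altStep (selected : List Int) (x : Int) : List Int :=
  let cand := selected ++ [x]
  let sums := pairSums cand
  if PySem.List.len sums = PySem.Set.len (PySem.Set.ofList sums) then cand else selected

def greedy_sidon_squares_py_alt (sq : List Int) : List Int :=
  PySem.Set.ofList (sq.foldl altStep [])

-- ===== PRECONDITION & SPEC =====
def Spec_greedy_sidon_squares_py (sq : List Int) (out : List Int) : Prop := out = greedy_sidon_squares_py_alt sq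
instance (sq : List Int) (out : List Int) : Decidable (Spec_greedy_sidon_squares_py sq out) := by unfold Spec_greedy_sidon_squares_py; infer_instance

-- ===== CLAIM (what is proved, stated in full; the proofs are below) =====
def Claim_equal_greedy_sidon_squares_py : Prop := ∀ (sq : List Int), Dom_greedy_sidon_squares_py sq → Spec_greedy_sidon_squares_py sq (greedy_sidon_squares_py sq)

-- ===== LEMMAS AND PROOFS =====

-- B's test 'len(sums) == len(set(sums))' means the sums list is duplicate-free
lemma len_ofList_eq_iff_nodup (l : List Int) :
    (PySem.List.len l = PySem.Set.len (PySem.Set.ofList l)) ↔ l.Nodup := by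
  have h : ∀ l : List Int, ((PySem.Set.ofList l).length = l.length) ↔ l.Nodup := by
    intro l
    induction l using List.reverseRecOn with
    | nil => simp [PySem.Set.ofList]
    | append_singleton xs y ih =>
      by_cases hy : y ∈ xs
      · have hy' : y ∈ PySem.Set.ofList xs := (PySem.Set.mem_ofList xs y).mpr hy
        rw [PySem.Set.ofList_append_singleton, PySem.Set.add_of_mem hy']
        constructor
        · intro hlen
          have := PySem.Set.length_ofList_le (xs := xs)
          simp [List.length_append] at hlen
          omega
        · intro hnd
          exact absurd rfl ((List.nodup_append.mp hnd).2.2 y hy y (by simp))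
      · have hy' : y ∉ PySem.Set.ofList xs := fun h => hy ((PySem.Set.mem_ofList xs y).mp h)
        rw [PySem.Set.ofList_append_singleton, PySem.Set.add_of_not_mem hy']
        simp only [List.length_append, List.nodup_append, ih, List.length_singleton,
          List.nodup_singleton, Nat.add_right_cancel_iff]
        constructor
        · intro hnd
          refine ⟨hnd, trivial, fun a ha b hb => ?_⟩
          simp only [List.mem_singleton] at hb
          subst hb
          exact fun h => hy (h ▸ ha)
        · exact fun h => h.1
  simp only [PySem.List.len_eq, PySem.Set.len, Nat.cast_inj]
  exact eq_comm.trans (h l)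

-- pairwise sums of selected + [x] split off the new block
lemma pairSums_append (sel : List Int) (x : Int) :
    pairSums (sel ++ [x]) = pairSums sel ++ (sel.map (· + x) ++ [x + x]) := by
  unfold pairSums
  rw [PySem.List.enumerate_append, List.flatMap_append]
  congr 1
  · apply List.flatMap_congr
    intro jb hjb
    obtain ⟨k, hk, rfl⟩ := (PySem.List.mem_enumerate_iff _ _ _).mp hjb
    have h1 : (0 : Int) + (k : Int) + 1 = ((k + 1 : Nat) : Int) := by push_cast; ring
    simp only [h1, PySem.List.slice_to_natCast]
    rw [List.take_append_of_le_length (by omega)]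
  · have h1 : (0 : Int) + (sel.length : Int) + 1 = ((sel.length + 1 : Nat) : Int) := by
      push_cast; ring
    simp only [PySem.List.enumerate, List.flatMap_cons, List.flatMap_nil, List.append_nil, h1,
      PySem.List.slice_to_natCast]
    rw [List.take_of_length_le (by simp), List.map_append]
    simp

-- characterisation of A's inner conflict loop
lemma sidonInner_spec (x : Int) (sums : PySem.Set Int) (sel : List Int) :
    ∀ acc : List Int, acc.Nodup →
      if (acc ++ sel.map (· + x)).Nodup ∧ ∀ s ∈ sel, s + x ∉ sums
      then sidonInner x sums sel acc = (acc ++ sel.map (· + x), false)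
      else (sidonInner x sums sel acc).2 = true := by
  induction sel with
  | nil =>
    intro acc hacc
    simp [sidonInner, hacc]
  | cons s rest ih =>
    intro acc hacc
    by_cases hhit : (PySem.Set.contains sums (s + x) || PySem.Set.contains acc (s + x)) = true
    · rw [Bool.or_eq_true] at hhit
      have hbad : ¬((acc ++ (s :: rest).map (· + x)).Nodup ∧ ∀ t ∈ s :: rest, t + x ∉ sums) := by
        rcases hhit with h | h
        · have : s + x ∈ sums := by simpa using (PySem.Set.contains_iff _ _).mp h
          exact fun hc => (hc.2 s (by simp)) this
        · have hmem : s + x ∈ acc := by simpa using (PySem.Set.contains_iff _ _).mp h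
          intro hc
          have := hc.1
          simp only [List.map_cons, List.nodup_append] at this
          exact this.2.2 _ hmem _ (by simp) rfl
      rw [if_neg hbad]
      simp only [sidonInner]
      rw [if_pos (by rw [Bool.or_eq_true]; exact hhit)]
    · rw [Bool.or_eq_true, not_or] at hhit
      have hns : s + x ∉ sums := fun h =>
        hhit.1 ((PySem.Set.contains_iff _ _).mpr (by simpa using h))
      have hna : s + x ∉ acc := fun h =>
        hhit.2 ((PySem.Set.contains_iff _ _).mpr (by simpa using h))
      have hstep : sidonInner x sums (s :: rest) acc = sidonInner x sums rest (acc ++ [s + x]) := by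
        simp only [sidonInner]
        rw [if_neg (by simp; exact ⟨hns, hna⟩), PySem.Set.add_of_not_mem hna]
      have hacc' : (acc ++ [s + x]).Nodup := by
        simp only [List.nodup_append, List.nodup_singleton]
        exact ⟨hacc, trivial, fun a ha b hb => by
          simp only [List.mem_singleton] at hb; subst hb; exact fun he => hna (he ▸ ha)⟩
      have key := ih (acc ++ [s + x]) hacc'
      have hcond : ((acc ++ [s + x]) ++ rest.map (· + x)).Nodup ∧ (∀ t ∈ rest, t + x ∉ sums) ↔
          (acc ++ (s :: rest).map (· + x)).Nodup ∧ ∀ t ∈ s :: rest, t + x ∉ sums := by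
        rw [List.append_assoc]
        simp only [List.singleton_append, List.map_cons]
        constructor
        · rintro ⟨h1, h2⟩
          exact ⟨h1, by intro t ht; rcases List.mem_cons.mp ht with rfl | ht; exact hns; exact h2 t ht⟩
        · rintro ⟨h1, h2⟩
          exact ⟨h1, fun t ht => h2 t (List.mem_cons_of_mem _ ht)⟩
      rw [hstep]
      by_cases hc : (acc ++ (s :: rest).map (· + x)).Nodup ∧ ∀ t ∈ s :: rest, t + x ∉ sums
      · rw [if_pos hc]
        rw [if_pos (hcond.mpr hc)] at key
        rw [key]
        simp
      · rw [if_neg hc]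
        rw [if_neg (fun h => hc (hcond.mp h))] at key
        exact key

-- one step preserves the relation between A's state and B's selected list

lemma step_spec (sel : List Int) (x : Int) (h : (pairSums sel).Nodup) :
    sidonStep (sel, pairSums sel) x = (altStep sel x, pairSums (altStep sel x)) ∧
      (pairSums (altStep sel x)).Nodup := by
  have key := sidonInner_spec x (pairSums sel) sel [] List.nodup_nil
  simp only [List.nil_append] at key
  unfold sidonStep altStep
  by_cases hC : (sel.map (· + x)).Nodup ∧ ∀ s ∈ sel, s + x ∉ pairSums sel
  · rw [if_pos hC] at key
    have hemp : (PySem.Set.empty : PySem.Set Int) = ([] : List Int) := rfl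
    by_cases hself : x + x ∈ pairSums sel ∨ x + x ∈ sel.map (· + x)
    · -- self_sum collides: A skips x, B's sums list has a duplicate
      have hnd : ¬ (pairSums (sel ++ [x])).Nodup := by
        rw [pairSums_append]
        intro hnd
        have h1 := List.nodup_append.mp hnd
        have h2 := List.nodup_append.mp h1.2.1
        rcases hself with hs | hs
        · exact h1.2.2 _ hs _ (List.mem_append_right _ (by simp)) rfl
        · exact h2.2.2 _ hs _ (by simp) rfl
      have hb : (PySem.Set.contains (pairSums sel) (2 * x)
          || PySem.Set.contains (sel.map (· + x)) (2 * x)) = true := by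
        rw [Bool.or_eq_true]
        rcases hself with hs | hs
        · exact Or.inl ((PySem.Set.contains_iff _ _).mpr (by rw [two_mul]; simpa using hs))
        · exact Or.inr ((PySem.Set.contains_iff _ _).mpr (by rw [two_mul]; simpa using hs))
      rw [if_neg (fun hl => hnd ((len_ofList_eq_iff_nodup _).mp hl))]
      simp only [hemp, key, Bool.false_eq_true, if_false, hb, if_true]
      exact ⟨trivial, h⟩
    · rw [not_or] at hself
      have hnotN : (2 : Int) * x ∉ sel.map (· + x) := by rw [two_mul]; exact hself.2
      have hnd : (pairSums (sel ++ [x])).Nodup := by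
        rw [pairSums_append]
        refine List.nodup_append.mpr ⟨h, List.nodup_append.mpr
          ⟨hC.1, List.nodup_singleton _, ?_⟩, ?_⟩
        · intro a ha b hb
          simp only [List.mem_singleton] at hb
          subst hb
          exact fun he => hself.2 (he ▸ ha)
        · intro a ha b hb
          rcases List.mem_append.mp hb with hb | hb
        -- b ∈ N or b = x+x ; a ∈ P
          · obtain ⟨s, hs, rfl⟩ := List.mem_map.mp hb
            exact fun he => (hC.2 s hs) (he ▸ ha)
          · simp only [List.mem_singleton] at hb
            subst hb
            exact fun he => hself.1 (he ▸ ha)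
      have hb : (PySem.Set.contains (pairSums sel) (2 * x)
          || PySem.Set.contains (sel.map (· + x)) (2 * x)) = false := by
        rw [Bool.or_eq_false_iff]
        constructor
        · rw [Bool.eq_false_iff]
          exact fun hcont => hself.1 (by rw [← two_mul]; simpa using (PySem.Set.contains_iff _ _).mp hcont)
        · rw [Bool.eq_false_iff]
          exact fun hcont => hnotN (by simpa using (PySem.Set.contains_iff _ _).mp hcont)
      rw [if_pos ((len_ofList_eq_iff_nodup _).mpr hnd)]
      refine ⟨?_, hnd⟩
      simp only [hemp, key, Bool.false_eq_true, if_false, hb]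
      have hupd : PySem.Set.update (pairSums sel)
          (PySem.Set.add (sel.map (· + x)) (2 * x)) = pairSums (sel ++ [x]) := by
        rw [PySem.Set.add_of_not_mem hnotN, pairSums_append,
          PySem.Set.update_eq_append_of_disjoint]
        · rw [two_mul]
        · refine List.nodup_append.mpr ⟨hC.1, List.nodup_singleton _, ?_⟩
          intro a ha b hb
          simp only [List.mem_singleton] at hb
          subst hb
          exact fun he => hnotN (he ▸ ha)
        · intro v hv
          rcases List.mem_append.mp hv with hv | hv
          · obtain ⟨s, hs, rfl⟩ := List.mem_map.mp hv
            exact hC.2 s hs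
          · simp only [List.mem_singleton] at hv
            subst hv
            rw [two_mul]
            exact hself.1
      rw [hupd]
  · -- conflict in the inner loop: A keeps the state, B rejects x too
    rw [if_neg hC] at key
    have hemp : (PySem.Set.empty : PySem.Set Int) = ([] : List Int) := rfl
    have hnd : ¬ (pairSums (sel ++ [x])).Nodup := by
      rw [pairSums_append]
      intro hnd
      apply hC
      have h1 := List.nodup_append.mp hnd
      have h2 := List.nodup_append.mp h1.2.1
      refine ⟨h2.1, fun s hs hmem => ?_⟩
      exact h1.2.2 _ hmem _ (List.mem_append_left _ (List.mem_map.mpr ⟨s, hs, rfl⟩)) rfl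
    rw [if_neg (fun hl => hnd ((len_ofList_eq_iff_nodup _).mp hl))]
    simp only [hemp, key, if_true]
    exact ⟨trivial, h⟩

lemma fold_spec (sq : List Int) :
    sq.foldl sidonStep ([], PySem.Set.empty) =
      (sq.foldl altStep [], pairSums (sq.foldl altStep [])) ∧
      (pairSums (sq.foldl altStep [])).Nodup := by
  have gen : ∀ (l sel : List Int), (pairSums sel).Nodup →
      l.foldl sidonStep (sel, pairSums sel) =
        (l.foldl altStep sel, pairSums (l.foldl altStep sel)) ∧
        (pairSums (l.foldl altStep sel)).Nodup := by
    intro l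
    induction l with
    | nil => exact fun sel h => ⟨rfl, h⟩
    | cons x rest ih =>
      intro sel h
      simp only [List.foldl_cons]
      rw [(step_spec sel x h).1]
      exact ih _ (step_spec sel x h).2
  have h0 : (( [] : List Int), (PySem.Set.empty : PySem.Set Int)) = ([], pairSums []) := rfl
  rw [h0]
  exact gen sq [] (by simp [pairSums, PySem.List.enumerate])

-- ===== VERDICT (by name: the statement is the Claim_ definition above) =====
theorem greedy_sidon_squares_py_spec : Claim_equal_greedy_sidon_squares_py := by
  intro sq _
  unfold Spec_greedy_sidon_squares_py greedy_sidon_squares_py greedy_sidon_squares_py_alt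
  rw [(fold_spec sq).1]
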